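-- pv_equiv track=rewrite | github.com/sbarczyk/WDI | Pycharm/Zestawy/Zestaw 3/3.7.py | if_only_odd
-- ===== SOURCE A (Python) =====
-- def if_only_odd(x):
--     while x > 0:
--         if (x % 10) % 2 == 1:
--             pass
--         else:
--             return False
--         x //= 10
--     return True
-- ===== SOURCE B (Python) =====
-- def if_only_odd(x):
--     if x <= 0:
--         return True
--     return all(c in '13579' for c in str(x))
-- ===== Notes on version B (the rewrite author's own statement) =====
-- stated objective: idiomatic
-- what changed: B tests the characters of the decimal string of x for membership in the odd-digit characters instead of A's arithmetic modulo/floor-division digit-extraction loop.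
import Mathlib
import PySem

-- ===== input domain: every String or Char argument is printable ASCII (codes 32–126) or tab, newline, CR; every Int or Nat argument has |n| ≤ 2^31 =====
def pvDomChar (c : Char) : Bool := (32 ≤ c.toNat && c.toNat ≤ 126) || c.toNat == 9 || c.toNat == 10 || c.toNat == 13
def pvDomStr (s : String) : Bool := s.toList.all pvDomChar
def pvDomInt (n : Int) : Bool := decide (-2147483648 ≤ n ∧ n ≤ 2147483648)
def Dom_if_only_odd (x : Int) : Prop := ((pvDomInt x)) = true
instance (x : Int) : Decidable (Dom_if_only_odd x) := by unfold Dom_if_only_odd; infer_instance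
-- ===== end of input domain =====

-- B tests the characters of the decimal string of x instead of A's arithmetic digit-extraction loop (more idiomatic; same cost).

-- ===== PORT A =====
-- A's while loop, step for step: pop the last digit, require it odd, shift the rest down.
def if_only_odd (x : Int) : Bool :=
  if _h : x > 0 then
    if PySem.Int.mod (PySem.Int.mod x 10) 2 == 1 then
      if_only_odd (PySem.Int.floordiv x 10)
    else
      false
  else
    true
termination_by x.toNat
decreasing_by
  have h10 : PySem.Int.floordiv x 10 = x / 10 := PySem.Int.floordiv_eq_ediv_of_pos (by omega)
  rw [h10]; omega

-- ===== PORT B =====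
-- B: guard the nonpositive case, then check every character of str(x).
-- 'c in "13579"' with c a single character is exactly list membership of that character.
def if_only_odd_alt (x : Int) : Bool :=
  if x ≤ 0 then true
  else (PySem.Int.toChars x).all (fun c => c ∈ ['1', '3', '5', '7', '9'])

-- ===== PRECONDITION & SPEC =====
def Spec_if_only_odd (x : Int) (out : Bool) : Prop := out = if_only_odd_alt x
instance (x : Int) (out : Bool) : Decidable (Spec_if_only_odd x out) := by unfold Spec_if_only_odd; infer_instance

-- ===== CLAIM (what is proved, stated in full; the proofs are below) =====
def Claim_equal_if_only_odd : Prop := ∀ (x : Int), Dom_if_only_odd x → Spec_if_only_odd x (if_only_odd x)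

-- ===== LEMMAS AND PROOFS =====

-- A's loop as a recursion over Nat (proof-side characterisation of both ports).
def gOdd (n : Nat) : Bool :=
  decide (n % 10 % 2 = 1) &&
    (if h : n / 10 = 0 then true else gOdd (n / 10))
termination_by n
decreasing_by omega

def oddCh (c : Char) : Bool := c ∈ ['1', '3', '5', '7', '9']

theorem oddCh_digitChar (d : Nat) (hd : d < 10) :
    oddCh (Nat.digitChar d) = decide (d % 2 = 1) := by
  interval_cases d <;> decide

theorem toDigitsCore_all_oddCh :
    ∀ (f n : Nat) (l : List Char), n < f →
      (Nat.toDigitsCore 10 f n l).all oddCh = (gOdd n && l.all oddCh) := by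
  intro f
  induction f with
  | zero => intro n l h; omega
  | succ f ih =>
    intro n l h
    rw [Nat.toDigitsCore]
    by_cases h0 : n / 10 = 0
    · rw [if_pos h0]
      conv_rhs => rw [gOdd]
      simp only [List.all_cons, dif_pos h0, Bool.and_true,
        oddCh_digitChar _ (Nat.mod_lt _ (by omega))]
    · rw [if_neg h0, ih _ _ (by omega)]
      conv_rhs => rw [gOdd]
      simp only [List.all_cons, dif_neg h0,
        oddCh_digitChar _ (Nat.mod_lt _ (by omega))]
      ac_rfl

theorem A_eq_gOdd : ∀ (n : Nat), 0 < n → if_only_odd (n : Int) = gOdd n := by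
  intro n
  induction n using Nat.strong_induction_on with
  | _ n ih =>
    intro hn
    rw [if_only_odd, gOdd]
    have h10 : (10 : Int) = ((10 : Nat) : Int) := by norm_num
    have h2 : (2 : Int) = ((2 : Nat) : Int) := by norm_num
    rw [dif_pos (by exact_mod_cast hn)]
    rw [h10, h2, PySem.Int.mod_natCast, PySem.Int.mod_natCast, PySem.Int.floordiv_natCast]
    have hmm : n % 10 % 2 = n % 2 := Nat.mod_mod_of_dvd n (by norm_num)
    by_cases hodd : n % 10 % 2 = 1
    · rw [if_pos (by exact_mod_cast decide_eq_true (congrArg (fun m => (m : Int) = 1) (congrArg _ hodd) ▸ rfl))]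
      simp only [decide_eq_true hodd, Bool.true_and]
      by_cases h0 : n / 10 = 0
      · rw [h0, dif_pos rfl]
        rw [if_only_odd]
        simp
      · rw [dif_neg h0, ih (n / 10) (by omega) (by omega)]
    · rw [if_neg (by simp; omega)]
      simp only [decide_eq_false hodd, Bool.false_and]

theorem B_eq_gOdd : ∀ (n : Nat), 0 < n → if_only_odd_alt (n : Int) = gOdd n := by
  intro n hn
  rw [if_only_odd_alt, if_neg (by omega), PySem.Int.toChars, if_neg (by omega)]
  have ht : ((n : Int)).toNat = n := Int.toNat_natCast n
  rw [ht, Nat.toDigits]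
  have h := toDigitsCore_all_oddCh (n + 1) n [] (by omega)
  simp only [List.all_nil, Bool.and_true] at h
  exact h

-- ===== VERDICT (by name: the statement is the Claim_ definition above) =====
theorem if_only_odd_spec : Claim_equal_if_only_odd := by
  intro x _
  unfold Spec_if_only_odd
  by_cases hx : 0 < x
  · obtain ⟨n, rfl⟩ : ∃ n : Nat, x = (n : Int) := ⟨x.toNat, (Int.toNat_of_nonneg (le_of_lt hx)).symm⟩
    rw [A_eq_gOdd n (by exact_mod_cast hx), B_eq_gOdd n (by exact_mod_cast hx)]
  · rw [if_only_odd, dif_neg hx, if_only_odd_alt, if_pos (by omega)]
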